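-- pv_equiv track=rewrite | github.com/nagdavid/Data-Science-Practical | Dsp.py.py | replace_duplicate_occurrence
-- ===== SOURCE A (Python) =====
-- def replace_duplicate_occurrence(string):
--     seen = set()
--     result = []
--     for char in string:
--         if char in seen:
--             result.append('$')
--         else:
--             result.append(char)
--             seen.add(char)
--     return ''.join(result)
-- ===== SOURCE B (Python) =====
-- def replace_duplicate_occurrence(string):
--     first = {}
--     for i, ch in enumerate(string):
--         if ch not in first:
--             first[ch] = i
--     return ''.join(ch if first[ch] == i else '$' for i, ch in enumerate(string))
-- ===== Notes on version B (the rewrite author's own statement) =====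
-- stated objective: alternative
-- what changed: Replaces the single pass with incremental seen-set state by two passes: first build a table mapping each character to its first index, then emit the character where its first index equals the current position and the replacement marker elsewhere.
import Mathlib
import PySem

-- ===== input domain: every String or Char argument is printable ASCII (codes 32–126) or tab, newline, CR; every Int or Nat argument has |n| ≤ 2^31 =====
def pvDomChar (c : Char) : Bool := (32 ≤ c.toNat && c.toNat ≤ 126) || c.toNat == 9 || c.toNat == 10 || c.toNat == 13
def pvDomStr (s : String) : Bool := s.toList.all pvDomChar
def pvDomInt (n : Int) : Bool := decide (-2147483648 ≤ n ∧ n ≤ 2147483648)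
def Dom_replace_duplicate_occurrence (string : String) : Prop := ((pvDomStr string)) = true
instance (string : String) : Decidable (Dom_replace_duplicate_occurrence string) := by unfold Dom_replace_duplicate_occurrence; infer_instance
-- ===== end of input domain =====

-- B replaces A's single pass with incremental seen-set state by two passes (a first-index table, then a position map); alternative structure, same cost.

-- ===== PORT A =====
-- loop body: append '$' for a seen char, else append the char and record it
def pvStepA (p : PySem.Set Char × List Char) (c : Char) : PySem.Set Char × List Char :=
  if PySem.Set.contains p.1 c then (p.1, p.2 ++ ['$'])
  else (PySem.Set.add p.1 c, p.2 ++ [c])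

def replace_duplicate_occurrence (string : String) : String :=
  let st := string.toList.foldl pvStepA (PySem.Set.empty, [])
  String.mk st.2

-- ===== PORT B =====
-- first = {}; for i, ch in enumerate(string): if ch not in first: first[ch] = i
def pvFirstTable (ps : List (Int × Char)) : PySem.Dict Char Int :=
  ps.foldl (fun d p => if d.contains p.2 then d else d.insert p.2 p.1) PySem.Dict.empty

-- ''.join(ch if first[ch] == i else '$' for i, ch in enumerate(string))
def replace_duplicate_occurrence_alt (string : String) : String :=
  let first := pvFirstTable (PySem.List.enumerate string.toList 0)
  String.mk ((PySem.List.enumerate string.toList 0).map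
    (fun q => if first.get? q.2 = some q.1 then q.2 else '$'))

-- ===== PRECONDITION & SPEC =====
def Spec_replace_duplicate_occurrence (string : String) (out : String) : Prop := out = replace_duplicate_occurrence_alt string
instance (string : String) (out : String) : Decidable (Spec_replace_duplicate_occurrence string out) := by unfold Spec_replace_duplicate_occurrence; infer_instance

-- ===== CLAIM (what is proved, stated in full; the proofs are below) =====
def Claim_equal_replace_duplicate_occurrence : Prop := ∀ (string : String), Dom_replace_duplicate_occurrence string → Spec_replace_duplicate_occurrence string (replace_duplicate_occurrence string)

-- ===== LEMMAS AND PROOFS =====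

-- common specification: output chars for suffix l given the set of chars already seen
def gSpec (seen : PySem.Set Char) : List Char → List Char
  | [] => []
  | c :: l => if PySem.Set.contains seen c then '$' :: gSpec seen l
              else c :: gSpec (PySem.Set.add seen c) l

theorem a_fold_eq (l : List Char) : ∀ (seen : PySem.Set Char) (acc : List Char),
    (l.foldl pvStepA (seen, acc)).2 = acc ++ gSpec seen l := by
  induction l with
  | nil => intro seen acc; simp [gSpec]
  | cons c l ih =>
    intro seen acc
    rw [List.foldl_cons]
    simp only [pvStepA, gSpec]
    by_cases h : PySem.Set.contains seen c
    · rw [if_pos h, if_pos h, ih, List.append_assoc]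
      rfl
    · rw [if_neg h, if_neg h, ih, List.append_assoc]
      rfl

-- the first-index table looks up the first occurrence index
theorem first_get (l : List Char) : ∀ (k : Int) (d : PySem.Dict Char Int) (c : Char),
    ((PySem.List.enumerate l k).foldl
        (fun d p => if d.contains p.2 then d else d.insert p.2 p.1) d).get? c
   = if d.contains c then d.get? c
     else if c ∈ l then some (k + (l.idxOf c : Int)) else none := by
  induction l with
  | nil =>
    intro k d c
    simp only [PySem.List.enumerate_nil, List.foldl_nil, List.not_mem_nil, if_false]
    by_cases hdc : d.contains c
    · rw [if_pos hdc]
    · rw [if_neg hdc, (PySem.Dict.get?_eq_none_iff_contains d c).mpr (by simpa using hdc)]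
  | cons a l ih =>
    intro k d c
    rw [PySem.List.enumerate_cons]
    simp only [List.foldl_cons]
    by_cases hca : c = a
    · subst hca
      by_cases hdc : d.contains c
      · rw [if_pos hdc, ih, if_pos hdc, if_pos hdc]
      · rw [if_neg hdc, ih, if_neg hdc]
        have h1 : (d.insert c k).contains c = true := PySem.Dict.contains_insert_self d c k
        rw [if_pos h1, PySem.Dict.get?_insert_self, if_pos (List.mem_cons_self),
            List.idxOf_cons_self]
        simp
    · have hidx : ((a :: l).idxOf c : Int) = (l.idxOf c : Int) + 1 := by
        rw [List.idxOf_cons_ne l (fun h => hca h.symm)]; push_cast; ring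
      have hmem : (c ∈ a :: l) ↔ (c ∈ l) := by
        simp [List.mem_cons, hca]
      by_cases hda : d.contains a
      · rw [if_pos hda, ih]
        by_cases hdc : d.contains c
        · rw [if_pos hdc, if_pos hdc]
        · rw [if_neg hdc, if_neg hdc]
          by_cases hml : c ∈ l
          · rw [if_pos hml, if_pos (hmem.mpr hml), hidx]; congr 1; ring
          · rw [if_neg hml, if_neg (fun h => hml (hmem.mp h))]
      · rw [if_neg hda, ih]
        have h2 : (d.insert a k).contains c = d.contains c := by
          rw [PySem.Dict.contains_insert]
          simp [hca]
        have h3 : (d.insert a k).get? c = d.get? c :=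
          PySem.Dict.get?_insert_of_ne d k hca
        rw [h2, h3]
        by_cases hdc : d.contains c
        · rw [if_pos hdc, if_pos hdc]
        · rw [if_neg hdc, if_neg hdc]
          by_cases hml : c ∈ l
          · rw [if_pos hml, if_pos (hmem.mpr hml), hidx]; congr 1; ring
          · rw [if_neg hml, if_neg (fun h => hml (hmem.mp h))]

theorem b_map_eq (w : List Char) (l : List Char) : ∀ (p : List Char), w = p ++ l →
    (PySem.List.enumerate l (p.length : Int)).map
      (fun q => if (pvFirstTable (PySem.List.enumerate w 0)).get? q.2 = some q.1 then q.2 else '$')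
    = gSpec (PySem.Set.ofList p) l := by
  induction l with
  | nil => intro p _; simp [PySem.List.enumerate_nil, gSpec]
  | cons c l ih =>
    intro p hw
    rw [PySem.List.enumerate_cons]
    simp only [List.map_cons]
    have hget : (pvFirstTable (PySem.List.enumerate w 0)).get? c
        = some ((w.idxOf c : Int)) := by
      rw [pvFirstTable, first_get]
      rw [if_neg (by simp [PySem.Dict.contains_empty]),
          if_pos (by rw [hw]; exact List.mem_append_right p List.mem_cons_self)]
      simp
    have hc1 : PySem.Set.ofList (p ++ [c]) = PySem.Set.add (PySem.Set.ofList p) c :=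
      PySem.Set.ofList_append_singleton p c
    have hlen : ((p ++ [c]).length : Int) = (p.length : Int) + 1 := by
      simp
    by_cases hcp : c ∈ p
    · -- duplicate: first index is inside p, strictly below p.length
      have hcontains : PySem.Set.contains (PySem.Set.ofList p) c = true :=
        (PySem.Set.contains_iff _ _).mpr ((PySem.Set.mem_ofList p c).mpr hcp)
      have hidx : w.idxOf c = p.idxOf c := by
        rw [hw]; exact List.idxOf_append_of_mem hcp
      have hlt : p.idxOf c < p.length := List.idxOf_lt_length_of_mem hcp
      have hne : ¬ ((pvFirstTable (PySem.List.enumerate w 0)).get? c = some ((p.length : Nat) : Int)) := by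
        rw [hget, hidx]
        intro h
        have := Option.some.inj h
        omega
      rw [if_neg hne, gSpec, if_pos hcontains]
      congr 1
      have := ih (p ++ [c]) (by simp [hw])
      rw [hlen, hc1, PySem.Set.add_of_mem ((PySem.Set.mem_ofList p c).mpr hcp)] at this
      exact this
    · -- first occurrence: first index is exactly p.length
      have hcontains : ¬ (PySem.Set.contains (PySem.Set.ofList p) c = true) :=
        fun h => hcp ((PySem.Set.mem_ofList p c).mp ((PySem.Set.contains_iff _ _).mp h))
      have hidx : w.idxOf c = p.length := by
        rw [hw, List.idxOf_append_of_notMem hcp, List.idxOf_cons_self]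
        omega
      have heq : (pvFirstTable (PySem.List.enumerate w 0)).get? c = some ((p.length : Nat) : Int) := by
        rw [hget, hidx]
      rw [if_pos heq, gSpec, if_neg hcontains]
      congr 1
      have := ih (p ++ [c]) (by simp [hw])
      rw [hlen, hc1] at this
      exact this

-- ===== VERDICT (by name: the statement is the Claim_ definition above) =====
theorem replace_duplicate_occurrence_spec : Claim_equal_replace_duplicate_occurrence := by
  intro s _
  show replace_duplicate_occurrence s = replace_duplicate_occurrence_alt s
  have hb := b_map_eq s.toList s.toList [] (List.nil_append s.toList).symm
  simp only [List.length_nil, Nat.cast_zero] at hb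
  simp only [replace_duplicate_occurrence, replace_duplicate_occurrence_alt]
  rw [a_fold_eq, hb]
  rfl
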